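-- pv_equiv track=rewrite | github.com/carlos-crespo-macaya/re-frame | backend/src/knowledge/cbt_context.py | detect_distortions
-- ===== SOURCE A (Python) =====
-- def detect_distortions(thought_text):
--     """
--     Analyze text for potential cognitive distortions.
--     Returns list of likely distortion codes.
--     """
--     thought_lower = thought_text.lower()
--     detected = []
--
--     # Simple keyword-based detection (can be enhanced with NLP)
--     # Check for absolute words
--     if any(
--         word in thought_lower
--         for word in ["always", "never", "everyone", "everything", "none", "nothing"]
--     ):
--         detected.append("AO")
--
--     # Fortune telling - look for future predictions with negative outcomes
--     future_words = ["will", "going to", "definitely", "won't", "can't"]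
--     negative_outcomes = ["fail", "disaster", "embarrass", "handle"]
--     if any(word in thought_lower for word in future_words) and any(
--         neg in thought_lower for neg in negative_outcomes
--     ):
--         detected.append("FT")
--
--     if any(word in thought_lower for word in ["should", "must", "have to", "ought"]):
--         detected.append("SH")
--
--     # Labeling - check for "I am/I'm" followed by negative labels
--     if "i am" in thought_lower or "i'm" in thought_lower:
--         labels = ["stupid", "loser", "failure", "worthless", "idiot", "incompetent"]
--         if any(label in thought_lower for label in labels):
--             detected.append("LB")
--
--     return detected
-- ===== SOURCE B (Python) =====
-- _ABS = ["always", "never", "everyone", "everything", "none", "nothing"]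
-- _FUT = ["will", "going to", "definitely", "won't", "can't"]
-- _NEG = ["fail", "disaster", "embarrass", "handle"]
-- _SH = ["should", "must", "have to", "ought"]
-- _SELF = ["i am", "i'm"]
-- _LAB = ["stupid", "loser", "failure", "worthless", "idiot", "incompetent"]
-- _ALL = _ABS + _FUT + _NEG + _SH + _SELF + _LAB
--
--
-- def detect_distortions(thought_text):
--     """Single left-to-right scan of the lowercased text collecting every
--     keyword that occurs anywhere (prefix test at each suffix), then the
--     distortion codes are derived from that one matched-keyword set."""
--     s = thought_text.lower()
--     found = set()
--     while True:
--         for w in _ALL: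
--             if s.startswith(w):
--                 found.add(w)
--         if not s:
--             break
--         s = s[1:]
--
--     def hit(group):
--         return any(w in found for w in group)
--
--     return [code for code, ok in
--             [("AO", hit(_ABS)),
--              ("FT", hit(_FUT) and hit(_NEG)),
--              ("SH", hit(_SH)),
--              ("LB", hit(_SELF) and hit(_LAB))]
--             if ok]
-- ===== Notes on version B (the rewrite author's own statement) =====
-- stated objective: alternative
-- what changed: Instead of A's per-keyword substring searches inside four if-branches, B makes one left-to-right scan over the suffixes of the lowercased text collecting every occurring keyword into a set, then derives the four codes from that matched set by a comprehension over (code, condition) pairs.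
import Mathlib
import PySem

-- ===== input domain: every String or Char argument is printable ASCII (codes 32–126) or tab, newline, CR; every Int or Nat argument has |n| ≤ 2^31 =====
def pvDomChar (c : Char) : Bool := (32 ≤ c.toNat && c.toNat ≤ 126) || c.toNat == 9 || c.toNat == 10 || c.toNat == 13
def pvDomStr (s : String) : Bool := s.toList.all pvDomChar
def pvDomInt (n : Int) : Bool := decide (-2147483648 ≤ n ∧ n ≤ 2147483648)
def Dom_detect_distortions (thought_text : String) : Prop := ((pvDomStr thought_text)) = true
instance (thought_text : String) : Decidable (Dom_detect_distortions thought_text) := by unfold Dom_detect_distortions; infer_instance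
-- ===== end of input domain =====

-- B replaces A's per-keyword substring searches by ONE suffix scan collecting
-- all occurring keywords into a set, then derives the codes from that set
-- (objective: alternative; same cost; equal return values).

-- ===== PORT A =====
def detect_distortions (thought_text : String) : List String :=
  let thought_lower := PySem.Str.lower thought_text
  let detected : List String := []
  let detected :=
    if ["always", "never", "everyone", "everything", "none", "nothing"].any
        (fun word => PySem.Str.isIn word thought_lower)
    then detected ++ ["AO"] else detected
  let future_words := ["will", "going to", "definitely", "won't", "can't"]
  let negative_outcomes := ["fail", "disaster", "embarrass", "handle"]
  let detected :=
    if (future_words.any (fun word => PySem.Str.isIn word thought_lower)) &&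
       (negative_outcomes.any (fun neg => PySem.Str.isIn neg thought_lower))
    then detected ++ ["FT"] else detected
  let detected :=
    if ["should", "must", "have to", "ought"].any
        (fun word => PySem.Str.isIn word thought_lower)
    then detected ++ ["SH"] else detected
  let detected :=
    if PySem.Str.isIn "i am" thought_lower || PySem.Str.isIn "i'm" thought_lower then
      let labels := ["stupid", "loser", "failure", "worthless", "idiot", "incompetent"]
      if labels.any (fun label => PySem.Str.isIn label thought_lower)
      then detected ++ ["LB"] else detected
    else detected
  detected

-- ===== PORT B =====
def ddAbs : List String := ["always", "never", "everyone", "everything", "none", "nothing"]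
def ddFut : List String := ["will", "going to", "definitely", "won't", "can't"]
def ddNeg : List String := ["fail", "disaster", "embarrass", "handle"]
def ddSh : List String := ["should", "must", "have to", "ought"]
def ddSelf : List String := ["i am", "i'm"]
def ddLab : List String := ["stupid", "loser", "failure", "worthless", "idiot", "incompetent"]
def ddAll : List (List Char) :=
  (ddAbs ++ ddFut ++ ddNeg ++ ddSh ++ ddSelf ++ ddLab).map String.toList

-- one position of the scan: add every keyword that starts here ('s.startswith(w)')
def ddStep (found : PySem.Set (List Char)) (s : List Char) : PySem.Set (List Char) :=
  ddAll.foldl (fun f w => if w.isPrefixOf s then PySem.Set.add f w else f) found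

-- the 'while' loop of Source B: visit every suffix of the text
def ddScan (found : PySem.Set (List Char)) : List Char → PySem.Set (List Char)
  | [] => ddStep found []
  | c :: rest => ddScan (ddStep found (c :: rest)) rest

def ddHit (found : PySem.Set (List Char)) (group : List String) : Bool :=
  group.any (fun w => PySem.Set.contains found w.toList)

def detect_distortions_alt (thought_text : String) : List String :=
  let s := (PySem.Str.lower thought_text).toList
  let found := ddScan PySem.Set.empty s
  ([("AO", ddHit found ddAbs),
    ("FT", ddHit found ddFut && ddHit found ddNeg),
    ("SH", ddHit found ddSh),
    ("LB", ddHit found ddSelf && ddHit found ddLab)].filter (fun p => p.2)).map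
    (fun p => p.1)

-- ===== PRECONDITION & SPEC =====
def Spec_detect_distortions (thought_text : String) (out : List String) : Prop := out = detect_distortions_alt thought_text
instance (thought_text : String) (out : List String) : Decidable (Spec_detect_distortions thought_text out) := by unfold Spec_detect_distortions; infer_instance

-- ===== CLAIM (what is proved, stated in full; the proofs are below) =====
def Claim_equal_detect_distortions : Prop := ∀ (thought_text : String), Dom_detect_distortions thought_text → Spec_detect_distortions thought_text (detect_distortions thought_text)

-- ===== LEMMAS AND PROOFS =====

theorem mem_ddStep (found : PySem.Set (List Char)) (s w : List Char) :
    w ∈ ddStep found s ↔ w ∈ found ∨ (w ∈ ddAll ∧ w <+: s) := by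
  unfold ddStep
  generalize ddAll = kws
  induction kws generalizing found with
  | nil => simp
  | cons k ks ih =>
    simp only [List.foldl_cons, ih, List.mem_cons]
    by_cases h : k <+: s
    · have hb : k.isPrefixOf s = true := by rw [List.isPrefixOf_iff_prefix]; exact h
      have h' : w = k → w <+: s := fun e => e ▸ h
      simp only [hb, if_true, PySem.Set.mem_add]
      tauto
    · have hb : k.isPrefixOf s = false := by
        rw [Bool.eq_false_iff]
        intro hc
        exact h (List.isPrefixOf_iff_prefix.1 hc)
      have h' : w = k → ¬ w <+: s := fun e => e ▸ h
      simp only [hb]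
      tauto

theorem mem_ddScan (found : PySem.Set (List Char)) (s w : List Char) :
    w ∈ ddScan found s ↔ w ∈ found ∨ (w ∈ ddAll ∧ w <:+: s) := by
  induction s generalizing found with
  | nil => simp [ddScan, mem_ddStep, List.prefix_nil, List.infix_nil]
  | cons c rest ih =>
    simp only [ddScan, ih, mem_ddStep, List.infix_cons_iff]
    tauto

theorem contains_ddScan (s w : List Char) (hw : w ∈ ddAll) :
    PySem.Set.contains (ddScan PySem.Set.empty s) w = PySem.Chars.isIn w s := by
  by_cases h : w <:+: s
  · have h1 : PySem.Set.contains (ddScan PySem.Set.empty s) w = true :=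
      (PySem.Set.contains_iff _ _).2 ((mem_ddScan _ _ _).2 (Or.inr ⟨hw, h⟩))
    rw [h1, ((PySem.Chars.isIn_iff_infix w s).2 h)]
  · have hne : w ∉ ddScan PySem.Set.empty s := by
      rw [mem_ddScan]
      rintro (hc | ⟨_, hc⟩)
      · simp [PySem.Set.empty] at hc
      · exact h hc
    have h1 : PySem.Set.contains (ddScan PySem.Set.empty s) w = false := by
      rw [Bool.eq_false_iff]
      intro hc
      exact hne ((PySem.Set.contains_iff _ _).1 hc)
    rw [h1, ((PySem.Chars.isIn_eq_false_iff w s).2 h)]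

theorem ddHit_eq (s : List Char) (g : List String) (hg : ∀ w ∈ g, w.toList ∈ ddAll) :
    ddHit (ddScan PySem.Set.empty s) g = g.any (fun w => PySem.Chars.isIn w.toList s) := by
  unfold ddHit
  induction g with
  | nil => rfl
  | cons x xs ih =>
    simp only [List.any_cons]
    rw [contains_ddScan s x.toList (hg x (by simp)),
      ih (fun w hw => hg w (List.mem_cons_of_mem _ hw))]

-- the common shape of the two results, as a function of the raw detector booleans
theorem ddShape (c1 c23 c4 c5 c6 : Bool) :
    (let d0 : List String := []
     let d1 := if c1 then d0 ++ ["AO"] else d0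
     let d2 := if c23 then d1 ++ ["FT"] else d1
     let d3 := if c4 then d2 ++ ["SH"] else d2
     if c5 then (if c6 then d3 ++ ["LB"] else d3) else d3)
    = ([("AO", c1), ("FT", c23), ("SH", c4), ("LB", c5 && c6)].filter
        (fun p => p.2)).map (fun p => p.1) := by
  cases c1 <;> cases c23 <;> cases c4 <;> cases c5 <;> cases c6 <;> rfl

-- ===== VERDICT (by name: the statement is the Claim_ definition above) =====
theorem detect_distortions_spec : Claim_equal_detect_distortions := by
  intro t _
  unfold Spec_detect_distortions
  have hAbs := ddHit_eq (PySem.Str.lower t).toList ddAbs (by decide)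
  have hFut := ddHit_eq (PySem.Str.lower t).toList ddFut (by decide)
  have hNeg := ddHit_eq (PySem.Str.lower t).toList ddNeg (by decide)
  have hSh := ddHit_eq (PySem.Str.lower t).toList ddSh (by decide)
  have hSelf := ddHit_eq (PySem.Str.lower t).toList ddSelf (by decide)
  have hLab := ddHit_eq (PySem.Str.lower t).toList ddLab (by decide)
  simp only [detect_distortions, detect_distortions_alt]
  simp only [hAbs, hFut, hNeg, hSh, hSelf, hLab]
  simp only [ddAbs, ddFut, ddNeg, ddSh, ddSelf, ddLab, PySem.Str.isIn_eq,
    List.any_cons, List.any_nil, Bool.or_false]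
  exact ddShape _ _ _ _ _
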